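-- pv_equiv track=rewrite | github.com/FrostKni/Adaptive_Honeypot | src/cognitive/profiler.py | _infer_goals
-- ===== SOURCE A (Python) =====
-- from typing import List, Dict, Any, Optional, Tuple
--
-- def _infer_goals(commands: List[str], signals: Dict[str, Any]) -> List[str]:
--     """Infer attacker objectives."""
--     goals = []
--
--     # Check for exploitation
--     if signals.get("exploitation_commands", 0) > 0:
--         goals.append("exploitation")
--
--     # Check for data exfiltration
--     for cmd in commands:
--         cmd_lower = cmd.lower() if cmd else ""
--         if any(x in cmd_lower for x in ["tar", "zip", "scp", "rsync", "base64"]):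
--             goals.append("data_exfiltration")
--             break
--
--     # Check for privilege escalation
--     for cmd in commands:
--         cmd_lower = cmd.lower() if cmd else ""
--         if "sudo" in cmd_lower or "su " in cmd_lower:
--             goals.append("privilege_escalation")
--             break
--
--     # Check for persistence
--     for cmd in commands:
--         cmd_lower = cmd.lower() if cmd else ""
--         if any(x in cmd_lower for x in ["crontab", "systemctl", "/etc/rc", "ssh-key"]):
--             goals.append("persistence")
--             break
--
--     return goals if goals else ["reconnaissance"]
-- ===== SOURCE B (Python) =====
-- def _infer_goals(commands, signals):
--     """Infer attacker objectives (single pass over commands, then build the goal list)."""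
--     exfil = privesc = persist = False
--     for cmd in commands:
--         cl = (cmd or "").lower()
--         exfil = exfil or any(x in cl for x in ["tar", "zip", "scp", "rsync", "base64"])
--         privesc = privesc or "sudo" in cl or "su " in cl
--         persist = persist or any(x in cl for x in ["crontab", "systemctl", "/etc/rc", "ssh-key"])
--     goals = (
--         (["exploitation"] if signals.get("exploitation_commands", 0) > 0 else [])
--         + (["data_exfiltration"] if exfil else [])
--         + (["privilege_escalation"] if privesc else [])
--         + (["persistence"] if persist else [])
--     )
--     return goals if goals else ["reconnaissance"]
-- ===== Notes on version B (the rewrite author's own statement) =====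
-- stated objective: simpler
-- what changed: Replaces A's three separate break-on-first-hit scans of commands by one pass accumulating three booleans, and builds the goal list by concatenating conditional singletons instead of incremental appends.
import Mathlib
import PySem

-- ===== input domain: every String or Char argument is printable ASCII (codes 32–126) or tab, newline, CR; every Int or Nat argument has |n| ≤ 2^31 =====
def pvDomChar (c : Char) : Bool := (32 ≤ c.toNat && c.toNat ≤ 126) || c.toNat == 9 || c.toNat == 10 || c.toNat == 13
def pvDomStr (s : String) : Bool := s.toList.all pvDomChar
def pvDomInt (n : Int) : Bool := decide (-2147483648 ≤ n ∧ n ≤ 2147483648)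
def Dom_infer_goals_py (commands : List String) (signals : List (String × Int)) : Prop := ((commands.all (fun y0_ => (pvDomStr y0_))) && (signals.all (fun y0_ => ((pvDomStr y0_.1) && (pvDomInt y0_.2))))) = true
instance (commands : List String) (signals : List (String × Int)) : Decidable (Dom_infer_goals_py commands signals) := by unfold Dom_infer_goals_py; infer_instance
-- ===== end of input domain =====

-- B replaces A's three break-on-first-hit scans of commands by one fold accumulating three
-- booleans and builds the goal list by concatenating conditional singletons (objective: simpler).

-- shared keyword predicates (the same literal checks both Pythons perform on a lowered command)
def pvExfil (cl : String) : Bool :=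
  (["tar", "zip", "scp", "rsync", "base64"] : List String).any (fun x => PySem.Str.isIn x cl)
def pvPriv (cl : String) : Bool :=
  PySem.Str.isIn "sudo" cl || PySem.Str.isIn "su " cl
def pvPersist (cl : String) : Bool :=
  (["crontab", "systemctl", "/etc/rc", "ssh-key"] : List String).any (fun x => PySem.Str.isIn x cl)

-- ===== PORT A =====
-- cmd.lower() if cmd else ""
def pvLowA (cmd : String) : String := if cmd ≠ "" then PySem.Str.lower cmd else ""

-- 'for cmd in commands: … if pred(cmd_lower): append; break' = first-hit scan
def pvScanA (pred : String → Bool) : List String → Bool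
  | [] => false
  | c :: rest => if pred (pvLowA c) then true else pvScanA pred rest

def infer_goals_py (commands : List String) (signals : List (String × Int)) : List String :=
  let goals : List String := []
  let goals := if (PySem.Dict.mk signals).getD "exploitation_commands" 0 > 0 then goals ++ ["exploitation"] else goals
  let goals := if pvScanA pvExfil commands then goals ++ ["data_exfiltration"] else goals
  let goals := if pvScanA pvPriv commands then goals ++ ["privilege_escalation"] else goals
  let goals := if pvScanA pvPersist commands then goals ++ ["persistence"] else goals
  if goals ≠ [] then goals else ["reconnaissance"]

-- ===== PORT B =====
-- one loop step: (cmd or "").lower(), or the three flags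
def pvStepB (st : Bool × Bool × Bool) (cmd : String) : Bool × Bool × Bool :=
  let cl := PySem.Str.lower (if cmd ≠ "" then cmd else "")
  (st.1 || pvExfil cl, st.2.1 || pvPriv cl, st.2.2 || pvPersist cl)

def infer_goals_py_alt (commands : List String) (signals : List (String × Int)) : List String :=
  let st := commands.foldl pvStepB (false, false, false)
  let goals :=
    (if (PySem.Dict.mk signals).getD "exploitation_commands" 0 > 0 then ["exploitation"] else [])
    ++ (if st.1 then ["data_exfiltration"] else [])
    ++ (if st.2.1 then ["privilege_escalation"] else [])
    ++ (if st.2.2 then ["persistence"] else [])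
  if goals ≠ [] then goals else ["reconnaissance"]

-- ===== PRECONDITION & SPEC =====
def Spec_infer_goals_py (commands : List String) (signals : List (String × Int)) (out : List String) : Prop := out = infer_goals_py_alt commands signals
instance (commands : List String) (signals : List (String × Int)) (out : List String) : Decidable (Spec_infer_goals_py commands signals out) := by unfold Spec_infer_goals_py; infer_instance

-- ===== CLAIM (what is proved, stated in full; the proofs are below) =====
def Claim_equal_infer_goals_py : Prop := ∀ (commands : List String) (signals : List (String × Int)), Dom_infer_goals_py commands signals → Spec_infer_goals_py commands signals (infer_goals_py commands signals)

-- ===== LEMMAS AND PROOFS =====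

-- B's lowering agrees with A's: lower("") = ""
theorem pv_low_eq (cmd : String) :
    PySem.Str.lower (if cmd ≠ "" then cmd else "") = pvLowA cmd := by
  by_cases h : cmd = ""
  · subst h; decide
  · simp [pvLowA, h]

theorem pv_scan_cons (pred : String → Bool) (c : String) (t : List String) :
    pvScanA pred (c :: t) = (pred (pvLowA c) || pvScanA pred t) := by
  cases h : pred (pvLowA c) <;> simp [pvScanA, h]

-- the single fold computes exactly the three first-hit scans
theorem pv_fold_eq (cmds : List String) (e p s : Bool) :
    cmds.foldl pvStepB (e, p, s)
      = (e || pvScanA pvExfil cmds, p || pvScanA pvPriv cmds, s || pvScanA pvPersist cmds) := by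
  induction cmds generalizing e p s with
  | nil => simp [pvScanA]
  | cons c t ih =>
      simp only [List.foldl, pvStepB, pv_low_eq, ih, pv_scan_cons, Bool.or_assoc]

-- ===== VERDICT (by name: the statement is the Claim_ definition above) =====
theorem infer_goals_py_spec : Claim_equal_infer_goals_py := by
  intro commands signals _
  unfold Spec_infer_goals_py infer_goals_py infer_goals_py_alt
  rw [pv_fold_eq]
  cases pvScanA pvExfil commands <;> cases pvScanA pvPriv commands <;>
    cases pvScanA pvPersist commands <;>
    by_cases h : (PySem.Dict.mk signals).getD "exploitation_commands" 0 > 0 <;> simp [h]
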